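-- pv_equiv track=rewrite | github.com/annetutil/annet | annet/api/__init__.py | collapse_texts
-- ===== SOURCE A (Python) =====
-- from itertools import groupby
-- from typing import (
--     Any,
--     Dict,
--     Generator,
--     Iterable,
--     List,
--     Mapping,
--     Optional,
--     Set,
--     Tuple,
--     Union,
--     cast,
-- )
--
-- def collapse_texts(texts: Mapping[str, str]) -> Mapping[Tuple[str, ...], str]:
--     """
--     Группировка текстов.
--     :param texts:
--     :return: словарь с несколькими хостнеймами в ключе.
--     """
--     diffs_with_orig = {key: [value, value.splitlines()] for key, value in texts.items()}
--     res = {}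
--     for _, collapsed_diff_iter in groupby(sorted(diffs_with_orig.items(), key=lambda x: (x[0], x[1][1])),
--                                           key=lambda x: x[1][1]):
--         collapsed_diff = list(collapsed_diff_iter)
--         res[tuple(x[0] for x in collapsed_diff)] = collapsed_diff[0][1][0]
--
--     return res
-- ===== SOURCE B (Python) =====
-- def collapse_texts(texts):
--     """Divide and conquer: recursively collapse each half of the key-sorted decorated
--     items, then merge the two group lists, joining the boundary groups when their
--     splitlines content matches."""
--     def collapse(items):
--         if len(items) <= 1:
--             return [([k], v, lines) for k, v, lines in items]
--         mid = len(items) // 2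
--         left = collapse(items[:mid])
--         right = collapse(items[mid:])
--         lk, lv, ll = left[-1]
--         rk, rv, rl = right[0]
--         if ll == rl:
--             return left[:-1] + [(lk + rk, lv, ll)] + right[1:]
--         return left + right
--     decorated = [(k, v, v.splitlines()) for k, v in sorted(texts.items(), key=lambda kv: kv[0])]
--     return {tuple(ks): v for ks, v, _ in collapse(decorated)}
-- ===== Notes on version B (the rewrite author's own statement) =====
-- stated objective: alternative
-- what changed: B replaces A's decorate-into-an-auxiliary-dict, sort by (hostname, splitlines) and linear itertools.groupby scan with a divide-and-conquer recursion: it recursively collapses each half of the key-sorted decorated items and merges the two group lists, joining the boundary groups when their splitlines content matches.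
import Mathlib
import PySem

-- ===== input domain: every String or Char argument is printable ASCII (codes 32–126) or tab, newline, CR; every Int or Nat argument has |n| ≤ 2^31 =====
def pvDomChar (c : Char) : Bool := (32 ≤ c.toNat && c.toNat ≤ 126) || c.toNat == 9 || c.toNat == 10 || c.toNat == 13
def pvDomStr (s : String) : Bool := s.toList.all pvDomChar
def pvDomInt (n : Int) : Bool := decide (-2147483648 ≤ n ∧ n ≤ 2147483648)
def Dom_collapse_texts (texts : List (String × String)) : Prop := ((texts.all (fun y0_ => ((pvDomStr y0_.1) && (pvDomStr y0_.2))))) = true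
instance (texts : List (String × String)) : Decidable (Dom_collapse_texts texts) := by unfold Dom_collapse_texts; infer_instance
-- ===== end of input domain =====

-- B collapses the key-sorted decorated items by divide and conquer (recurse on the two
-- halves, merge the two group lists at the boundary) instead of A's decorate(aux dict)–
-- sort-by-(key,lines)–linear-groupby scan; same return value (a dict, ported as its items list).

-- ===== PORT A =====
-- itertools.groupby over a list: maximal runs of adjacent elements with equal key
def pvRuns {α κ : Type} [BEq κ] (key : α → κ) : List α → List (List α)
  | [] => []
  | x :: xs =>
      (x :: xs.takeWhile (fun y => key y == key x)) ::
        pvRuns key (xs.dropWhile (fun y => key y == key x))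
  termination_by l => l.length
  decreasing_by
    simp only [List.length_cons]
    exact Nat.lt_succ_of_le (List.length_dropWhile_le _ _)

def collapse_texts (texts : List (String × String)) : List (List String × String) :=
  let t := PySem.Dict.ofList texts
  let diffs : PySem.Dict String (String × List String) :=
    t.items.foldl (fun d p => d.insert p.1 (p.2, PySem.Str.splitlines p.2)) PySem.Dict.empty
  let s := PySem.List.sorted2 diffs.items (fun x => x.1) (fun x => x.2.2)
  let res := (pvRuns (fun x => x.2.2) s).foldl
      (fun r c => r.insert (c.map (fun x => x.1)) ((c.headD ("", ("", []))).2.1))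
      (PySem.Dict.empty : PySem.Dict (List String) String)
  res.items

-- ===== PORT B =====
-- inner 'collapse' of Source B: recurse on the two halves, merge the group lists at the boundary
def pvCollapse (items : List (String × String × List String)) :
    List (List String × String × List String) :=
  if _h : items.length ≤ 1 then
    items.map (fun x => ([x.1], x.2.1, x.2.2))
  else
    let mid := items.length / 2
    let left := pvCollapse (items.take mid)
    let right := pvCollapse (items.drop mid)
    let L := left.getLastD ([], "", [])
    let R := right.headD ([], "", [])
    if L.2.2 = R.2.2 then
      left.dropLast ++ (L.1 ++ R.1, L.2.1, L.2.2) :: right.tail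
    else
      left ++ right
  termination_by items.length
  decreasing_by
  · simp only [List.length_take]
    omega
  · simp only [List.length_drop]
    omega

def collapse_texts_alt (texts : List (String × String)) : List (List String × String) :=
  let t := PySem.Dict.ofList texts
  let dec := (PySem.List.sorted t.items (fun kv => kv.1)).map
      (fun p => (p.1, p.2, PySem.Str.splitlines p.2))
  ((pvCollapse dec).foldl (fun d g => d.insert g.1 g.2.1)
      (PySem.Dict.empty : PySem.Dict (List String) String)).items

-- ===== PRECONDITION & SPEC =====
def Spec_collapse_texts (texts : List (String × String)) (out : List (List String × String)) : Prop := out = collapse_texts_alt texts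
instance (texts : List (String × String)) (out : List (List String × String)) : Decidable (Spec_collapse_texts texts out) := by unfold Spec_collapse_texts; infer_instance

-- ===== CLAIM (what is proved, stated in full; the proofs are below) =====
def Claim_equal_collapse_texts : Prop := ∀ (texts : List (String × String)), Dom_collapse_texts texts → Spec_collapse_texts texts (collapse_texts texts)

-- ===== LEMMAS AND PROOFS =====

-- insertBy only inspects the comparison on the inserted element vs. the accumulator
theorem pv_insertBy_congr {α : Type} (f g : α → α → Bool) (x : α) (acc : List α)
    (h : ∀ b ∈ acc, f x b = g x b) :
    PySem.List.insertBy f x acc = PySem.List.insertBy g x acc := by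
  induction acc with
  | nil => rfl
  | cons y ys ih =>
      simp only [PySem.List.insertBy]
      rw [h y (by simp)]
      by_cases hg : g x y = true
      · simp [hg]
      · simp only [Bool.not_eq_true] at hg
        simp [hg, ih (fun b hb => h b (by simp [hb]))]

theorem pv_foldl_insertBy_congr {α : Type} (f g : α → α → Bool) :
    ∀ (xs acc : List α), (∀ a ∈ xs, ∀ b, (b ∈ acc ∨ b ∈ xs) → f a b = g a b) →
    xs.foldl (fun acc x => PySem.List.insertBy f x acc) acc =
      xs.foldl (fun acc x => PySem.List.insertBy g x acc) acc := by
  intro xs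
  induction xs with
  | nil => intro acc _; rfl
  | cons x xs ih =>
      intro acc h
      simp only [List.foldl_cons]
      rw [pv_insertBy_congr f g x acc (fun b hb => h x (by simp) b (Or.inl hb))]
      exact ih (PySem.List.insertBy g x acc) (fun a ha b hb => by
        refine h a (by simp [ha]) b ?_
        rcases hb with hb | hb
        · rcases (PySem.List.mem_insertBy g x b acc).1 hb with hb | hb
          · subst hb; exact Or.inr (by simp)
          · exact Or.inl hb
        · exact Or.inr (by simp [hb]))

-- when the primary key is injective on the list, the secondary sort key is never consulted
theorem pv_sorted2_eq_sorted {α κ₁ κ₂ : Type} [LinearOrder κ₁] [LT κ₂] [DecidableLT κ₂]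
    (xs : List α) (k1 : α → κ₁) (k2 : α → κ₂) (rev : Bool)
    (hirr : ∀ a : α, ¬ k2 a < k2 a)
    (hinj : ∀ a ∈ xs, ∀ b ∈ xs, k1 a = k1 b → a = b) :
    PySem.List.sorted2 xs k1 k2 rev = PySem.List.sorted xs k1 rev := by
  have key : ∀ a ∈ xs, ∀ b ∈ xs,
      (decide (k1 a < k1 b) || (!decide (k1 b < k1 a) && decide (k2 a < k2 b)))
        = decide (k1 a < k1 b) := by
    intro a ha b hb
    rcases lt_trichotomy (k1 a) (k1 b) with h | h | h
    · simp [h, not_lt_of_gt h]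
    · have : a = b := hinj a ha b hb h
      subst this; simp [hirr a]
    · simp [not_lt_of_gt h, h]
  unfold PySem.List.sorted2 PySem.List.sorted
  cases rev with
  | false =>
      simp only [if_neg (by simp : ¬ (false = true))]
      exact pv_foldl_insertBy_congr _ _ xs [] (fun a ha b hb => by
        rcases hb with hb | hb
        · simp at hb
        · exact key a ha b hb)
  | true =>
      simp only [if_pos]
      exact pv_foldl_insertBy_congr _ _ xs [] (fun a ha b hb => by
        rcases hb with hb | hb
        · simp at hb
        · exact key b hb a ha)

-- the per-run summary produced by B's base case and merge step
def pvFS (c : List (String × String × List String)) : List String × String × List String :=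
  (c.map (fun x => x.1), (c.headD ("", "", [])).2.1, (c.headD ("", "", [])).2.2)

theorem pvRuns_eq_nil_iff {α κ : Type} [BEq κ] (key : α → κ) (S : List α) :
    pvRuns key S = [] ↔ S = [] := by
  cases S with
  | nil => simp [pvRuns]
  | cons x xs => simp [pvRuns]

-- every run is nonempty and key-constant
theorem pvRuns_chunks {α κ : Type} [BEq κ] [LawfulBEq κ] (key : α → κ) (S : List α) :
    ∀ c ∈ pvRuns key S, ∃ a t, c = a :: t ∧ ∀ y ∈ t, key y = key a := by
  induction S using pvRuns.induct key with
  | case1 => simp [pvRuns]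
  | case2 x xs ih =>
      intro c hc
      simp only [pvRuns, List.mem_cons] at hc
      rcases hc with hc | hc
      · exact ⟨x, xs.takeWhile (fun y => key y == key x), hc,
          fun y hy => by simpa using List.mem_takeWhile_imp hy⟩
      · exact ih c hc

theorem pvRuns_cons_cons {α κ : Type} [BEq κ] [LawfulBEq κ] (key : α → κ)
    (p q : α) (S : List α) (c : List α) (cs : List (List α))
    (h : pvRuns key (q :: S) = c :: cs) :
    pvRuns key (p :: q :: S) =
      if key p == key q then (p :: c) :: cs else [p] :: c :: cs := by
  rw [pvRuns] at h
  obtain ⟨hc, hcs⟩ := List.cons.injEq .. ▸ h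
  by_cases hpq : key p = key q
  · have hqp : (key q == key p) = true := by simp [hpq]
    have hfun : (fun y => key y == key p) = (fun y => key y == key q) := by
      funext y; rw [hpq]
    rw [pvRuns, if_pos (by simp [hpq]), List.takeWhile_cons, List.dropWhile_cons]
    simp only [hqp, if_pos, hfun, ← hc, ← hcs]
  · have hqp : (key q == key p) = false := by
      simp only [beq_eq_false_iff_ne, ne_eq]; exact fun e => hpq e.symm
    rw [pvRuns, if_neg (by simp [hpq]), List.takeWhile_cons, List.dropWhile_cons]
    simp only [hqp, Bool.false_eq_true, if_false, ← h, pvRuns]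

-- the first run of a nonempty list starts with its head
theorem pvRuns_head {α κ : Type} [BEq κ] (key : α → κ) (x : α) (xs : List α) :
    ∃ t cs, pvRuns key (x :: xs) = (x :: t) :: cs := by
  rw [pvRuns]; exact ⟨_, _, rfl⟩

-- one step of grouping: push x onto the first run when the keys agree
def pvStep {α κ : Type} [BEq κ] (key : α → κ) (d : α) (x : α) :
    List (List α) → List (List α)
  | [] => [[x]]
  | c :: cs => if key x == key (c.headD d) then (x :: c) :: cs else [x] :: c :: cs

-- merging two run lists at the boundary
def pvMerge {α κ : Type} [BEq κ] (key : α → κ) (d : α) :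
    List (List α) → List (List α) → List (List α)
  | [], qs => qs
  | rs, [] => rs
  | rs, q :: qs =>
      if key ((rs.getLastD []).headD d) == key (q.headD d) then
        rs.dropLast ++ ((rs.getLastD []) ++ q) :: qs
      else rs ++ q :: qs

theorem pvRuns_cons {α κ : Type} [BEq κ] [LawfulBEq κ] (key : α → κ) (d : α)
    (x : α) (L : List α) :
    pvRuns key (x :: L) = pvStep key d x (pvRuns key L) := by
  cases L with
  | nil => simp [pvRuns, pvStep]
  | cons q S =>
      obtain ⟨t, cs, h⟩ := pvRuns_head key q S
      rw [pvRuns_cons_cons key x q S _ _ h, h]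
      simp [pvStep]

-- pvStep commutes with pvMerge (given that all runs are nonempty)
theorem pvStep_merge {α κ : Type} [BEq κ] [LawfulBEq κ] (key : α → κ) (d : α) (x : α)
    (rs qs : List (List α)) (hne : ∀ c ∈ rs, c ≠ []) :
    pvStep key d x (pvMerge key d rs qs) = pvMerge key d (pvStep key d x rs) qs := by
  cases qs with
  | nil =>
      cases rs with
      | nil => rfl
      | cons r rs' =>
          cases hr : pvStep key d x (r :: rs') with
          | nil => simp only [pvStep] at hr; split at hr <;> simp_all
          | cons c cs => simp [pvMerge, hr]
  | cons q qs' =>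
      cases rs with
      | nil =>
          by_cases hk : key x = key (q.headD d)
          · have hkb : (key x == key (q.head?.getD d)) = true := by simpa using hk
            simp [pvMerge, pvStep, hkb]
          · have hkb : (key x == key (q.head?.getD d)) = false := by simpa using hk
            simp [pvMerge, pvStep, hkb]
      | cons r rs' =>
          cases rs' with
          | nil =>
              have hr : r ≠ [] := hne r (by simp)
              obtain ⟨a, r', rfl⟩ : ∃ a r', r = a :: r' := by
                cases r with
                | nil => cases hr rfl
                | cons a r' => exact ⟨a, r', rfl⟩
              by_cases hC : key a = key (q.headD d) <;>
                by_cases hk : key x = key a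
              · have hCb : (key a == key (q.head?.getD d)) = true := by simpa using hC
                have hkb : (key x == key a) = true := by simpa using hk
                have hxq : (key x == key (q.head?.getD d)) = true := by
                  simpa using hk.trans hC
                simp [pvMerge, pvStep, hCb, hkb, hxq]
              · have hCb : (key a == key (q.head?.getD d)) = true := by simpa using hC
                have hkb : (key x == key a) = false := by simpa using hk
                simp [pvMerge, pvStep, hCb, hkb]
              · have hCb : (key a == key (q.head?.getD d)) = false := by simpa using hC
                have hkb : (key x == key a) = true := by simpa using hk
                have hxq : (key x == key (q.head?.getD d)) = false := by
                  simp only [hk]; simpa using hC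
                simp [pvMerge, pvStep, hCb, hkb, hxq]
              · have hCb : (key a == key (q.head?.getD d)) = false := by simpa using hC
                have hkb : (key x == key a) = false := by simpa using hk
                simp [pvMerge, pvStep, hCb, hkb]
          | cons r2 rs'' =>
              by_cases hC : key (((r2 :: rs'').getLastD []).headD d) = key (q.headD d) <;>
                by_cases hk : key x = key (r.headD d)
              · have hCb : (key (((r2 :: rs'').getLast?.getD []).head?.getD d)
                    == key (q.head?.getD d)) = true := by simpa using hC
                have hkb : (key x == key (r.head?.getD d)) = true := by simpa using hk
                simp [pvMerge, pvStep, hCb, hkb]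
              · have hCb : (key (((r2 :: rs'').getLast?.getD []).head?.getD d)
                    == key (q.head?.getD d)) = true := by simpa using hC
                have hkb : (key x == key (r.head?.getD d)) = false := by simpa using hk
                simp [pvMerge, pvStep, hCb, hkb]
              · have hCb : (key (((r2 :: rs'').getLast?.getD []).head?.getD d)
                    == key (q.head?.getD d)) = false := by simpa using hC
                have hkb : (key x == key (r.head?.getD d)) = true := by simpa using hk
                simp [pvMerge, pvStep, hCb, hkb]
              · have hCb : (key (((r2 :: rs'').getLast?.getD []).head?.getD d)
                    == key (q.head?.getD d)) = false := by simpa using hC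
                have hkb : (key x == key (r.head?.getD d)) = false := by simpa using hk
                simp [pvMerge, pvStep, hCb, hkb]

theorem pvRuns_nonempty {α κ : Type} [BEq κ] [LawfulBEq κ] (key : α → κ) (S : List α) :
    ∀ c ∈ pvRuns key S, c ≠ [] := by
  intro c hc
  obtain ⟨a, t, rfl, -⟩ := pvRuns_chunks key S c hc
  simp

-- runs of an append = boundary merge of the runs of the parts
theorem pvRuns_append {α κ : Type} [BEq κ] [LawfulBEq κ] (key : α → κ) (d : α) :
    ∀ (A B : List α),
    pvRuns key (A ++ B) = pvMerge key d (pvRuns key A) (pvRuns key B) := by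
  intro A
  induction A with
  | nil =>
      intro B
      simp [pvRuns, pvMerge]
  | cons x A' ih =>
      intro B
      rw [List.cons_append, pvRuns_cons key d, ih B, pvRuns_cons key d x A']
      exact pvStep_merge key d x _ _ (pvRuns_nonempty key A')

-- getLastD through a map, and membership of getLastD
theorem pv_map_getLastD {α β : Type} (f : α → β) (a : α) (l : List α) (d : β) (d' : α) :
    ((a :: l).map f).getLastD d = f ((a :: l).getLastD d') := by
  induction l generalizing a with
  | nil => rfl
  | cons b l ih =>
      rw [List.map_cons, List.getLastD_cons, List.getLastD_cons]
      exact ih b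

theorem pv_getLastD_mem {α : Type} (a : α) (l : List α) (d : α) :
    (a :: l).getLastD d ∈ a :: l := by
  induction l generalizing a with
  | nil => simp
  | cons b l ih =>
      rw [List.getLastD_cons]
      exact List.mem_cons_of_mem a (ih b)

-- the divide-and-conquer collapse computes exactly the run summaries
theorem pvCollapse_eq_runs (items : List (String × String × List String)) :
    pvCollapse items = (pvRuns (fun x => x.2.2) items).map pvFS := by
  generalize hn : items.length = n
  induction n using Nat.strong_induction_on generalizing items with
  | _ n ih =>
  by_cases h : items.length ≤ 1
  · match items, h with
    | [], _ => simp [pvCollapse, pvRuns]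
    | [x], _ => simp [pvCollapse, pvRuns, pvFS]
  · have hlen : 2 ≤ items.length := by omega
    rw [pvCollapse, dif_neg h]
    simp only
    have ih1 := ih (items.take (items.length / 2)).length
      (by simp only [List.length_take]; omega) _ rfl
    have ih2 := ih (items.drop (items.length / 2)).length
      (by simp only [List.length_drop]; omega) _ rfl
    rw [ih1, ih2]
    conv_rhs => rw [← List.take_append_drop (items.length / 2) items]
    rw [pvRuns_append (fun x => x.2.2) ("", "", [])]
    have hAne : items.take (items.length / 2) ≠ [] := by
      have : (items.take (items.length / 2)).length = items.length / 2 := by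
        simp [List.length_take]; omega
      intro hcon; rw [hcon] at this; simp at this; omega
    have hBne : items.drop (items.length / 2) ≠ [] := by
      have : (items.drop (items.length / 2)).length = items.length - items.length / 2 := by
        simp [List.length_drop]
      intro hcon; rw [hcon] at this; simp at this; omega
    obtain ⟨r, rs', hrA⟩ : ∃ r rs', pvRuns (fun x => x.2.2) (items.take (items.length / 2)) = r :: rs' := by
      cases hA : pvRuns (fun x => x.2.2) (items.take (items.length / 2)) with
      | nil => exact absurd ((pvRuns_eq_nil_iff _ _).1 hA) hAne
      | cons r rs' => exact ⟨r, rs', rfl⟩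
    obtain ⟨q, qs', hrB⟩ : ∃ q qs', pvRuns (fun x => x.2.2) (items.drop (items.length / 2)) = q :: qs' := by
      cases hB : pvRuns (fun x => x.2.2) (items.drop (items.length / 2)) with
      | nil => exact absurd ((pvRuns_eq_nil_iff _ _).1 hB) hBne
      | cons q qs' => exact ⟨q, qs', rfl⟩
    rw [hrA, hrB]
    -- the last run on the left is nonempty
    obtain ⟨la, lt', hlast, -⟩ := pvRuns_chunks (fun x => x.2.2) (items.take (items.length / 2))
      ((r :: rs').getLastD []) (hrA ▸ pv_getLastD_mem r rs' [])
    have hmapLast : ((r :: rs').map pvFS).getLastD ([], "", []) = pvFS ((r :: rs').getLastD []) :=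
      pv_map_getLastD pvFS r rs' _ []
    by_cases hC : (((r :: rs').getLastD []).headD ("", "", [])).2.2 = (q.headD ("", "", [])).2.2
    · have hb : ((((r :: rs').getLastD []).headD ("", "", [])).2.2 == (q.headD ("", "", [])).2.2) = true :=
        beq_iff_eq.mpr hC
      have hmerge : pvMerge (fun x => x.2.2) ("", "", []) (r :: rs') (q :: qs')
          = (r :: rs').dropLast ++ (((r :: rs').getLastD []) ++ q) :: qs' := by
        simp only [pvMerge]
        rw [if_pos hb]
      have hif : (((r :: rs').map pvFS).getLastD ([], "", [])).2.2
          = (((q :: qs').map pvFS).headD ([], "", [])).2.2 := by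
        rw [hmapLast]
        simpa [pvFS] using hC
      rw [hmerge, if_pos hif, List.map_append, List.map_cons]
      congr 1
      · simp [List.map_dropLast]
      · congr 1
        rw [show (pvFS r :: List.map pvFS rs') = List.map pvFS (r :: rs') from rfl, hmapLast, hlast]
        simp [pvFS]
    · have hif : ¬ ((((r :: rs').map pvFS).getLastD ([], "", [])).2.2
          = (((q :: qs').map pvFS).headD ([], "", [])).2.2) := by
        rw [hmapLast]
        simpa [pvFS] using hC
      have hmerge : pvMerge (fun x => x.2.2) ("", "", []) (r :: rs') (q :: qs')
          = (r :: rs') ++ q :: qs' := by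
        simp only [pvMerge]
        rw [if_neg (by simpa using hC)]
      rw [hmerge, if_neg hif]
      simp

-- pairwise < on keys from pairwise ≤ plus nodup keys
theorem pv_pairwise_lt {α κ : Type} [LinearOrder κ] (l : List α) (key : α → κ)
    (hle : l.Pairwise (fun a b => key a ≤ key b)) (hnd : (l.map key).Nodup) :
    l.Pairwise (fun a b => key a < key b) := by
  have hne : l.Pairwise (fun a b => key a ≠ key b) := List.pairwise_map.mp hnd
  exact (hle.and hne).imp (fun h => lt_of_le_of_ne h.1 h.2)

-- assembling both ports into the common canonical form
theorem pv_main (texts : List (String × String)) :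
    collapse_texts texts = collapse_texts_alt texts := by
  classical
  set t := PySem.Dict.ofList texts with ht
  set f : (String × String) → String × (String × List String) :=
    fun p => (p.1, (p.2, PySem.Str.splitlines p.2)) with hf
  have hnodup : (t.items.map (fun p => p.1)).Nodup := PySem.Dict.nodup_keys_ofList texts
  have hdiffs : (t.items.foldl (fun d p => d.insert p.1 (p.2, PySem.Str.splitlines p.2))
      PySem.Dict.empty).items = t.items.map f := by
    have := PySem.Dict.items_foldl_insert_fresh t.items (fun p => p.1)
      (fun p => (p.2, PySem.Str.splitlines p.2)) PySem.Dict.empty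
      (fun a _ => by simp) hnodup
    simpa [hf] using this
  set S := PySem.List.sorted t.items (fun p => p.1) with hS
  have hSperm : S.Perm t.items := PySem.List.sorted_perm ..
  have hSnodup : (S.map (fun p => p.1)).Nodup := ((hSperm.map _).nodup_iff).mpr hnodup
  have hSlt : S.Pairwise (fun a b => a.1 < b.1) :=
    pv_pairwise_lt _ _ (PySem.List.sorted_pairwise ..) hSnodup
  -- A's sort collapses to the canonical key-sorted list, decorated by f
  have hA1 : PySem.List.sorted2 (t.items.map f) (fun x => x.1) (fun x => x.2.2)
      = PySem.List.sorted (t.items.map f) (fun x => x.1) := by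
    refine pv_sorted2_eq_sorted _ _ _ _ (fun a => lt_irrefl _) ?_
    refine List.inj_on_of_nodup_map ?_
    simpa [List.map_map, Function.comp_def, hf] using hnodup
  have hA2 : PySem.List.sorted (t.items.map f) (fun x => x.1) = S.map f := by
    refine PySem.List.sorted_eq_of_perm_of_pairwise_lt _ _ _ (hSperm.map f) ?_
    exact List.pairwise_map.mpr (by simpa [hf] using hSlt)
  simp only [collapse_texts, collapse_texts_alt, ← ht, hdiffs, hA1, hA2, ← hS]
  rw [pvCollapse_eq_runs, List.foldl_map]
  rfl

-- ===== VERDICT (by name: the statement is the Claim_ definition above) =====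
theorem collapse_texts_spec : Claim_equal_collapse_texts := by
  intro texts _
  exact pv_main texts
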